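-- pv_equiv track=rewrite | github.com/DrShIkIgAmy/CodeRockBattle | tasks/task_15.py | get_variations_single
-- ===== SOURCE A (Python) =====
-- def get_variations_single(hint: list, order= 5):
--     hint = hint[0]
--     if hint > order:
--         return None
--     if hint == order:
--         return [[1]*order]
--     lst = []
--     for i in range(order - hint + 1):
--         tmp = [0]*i+[1]*hint+[0]*(order - hint -i)
--         lst.append(tmp)
--     return lst
-- ===== SOURCE B (Python) =====
-- def get_variations_single(hint: list, order=5):
--     h = hint[0]
--     if h > order:
--         return None
--     # first placement: block of ones at the left, zeros to the right
--     row = [1] * h + [0] * (order - h)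
--     rows = [row.copy()]
--     # slide the block one step right each iteration: prepend 0, drop the last 0
--     for _ in range(order - h):
--         row.insert(0, 0)
--         row.pop()
--         rows.append(row.copy())
--     return rows
-- ===== Notes on version B (the rewrite author's own statement) =====
-- stated objective: alternative
-- what changed: Replaces per-row reconstruction by three concatenations inside a range loop with a single mutable row that is slid right one step per iteration (prepend 0, pop the trailing 0), appending copies; the hint==order special case disappears because zero slides naturally yield [[1]*order].
import Mathlib
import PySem

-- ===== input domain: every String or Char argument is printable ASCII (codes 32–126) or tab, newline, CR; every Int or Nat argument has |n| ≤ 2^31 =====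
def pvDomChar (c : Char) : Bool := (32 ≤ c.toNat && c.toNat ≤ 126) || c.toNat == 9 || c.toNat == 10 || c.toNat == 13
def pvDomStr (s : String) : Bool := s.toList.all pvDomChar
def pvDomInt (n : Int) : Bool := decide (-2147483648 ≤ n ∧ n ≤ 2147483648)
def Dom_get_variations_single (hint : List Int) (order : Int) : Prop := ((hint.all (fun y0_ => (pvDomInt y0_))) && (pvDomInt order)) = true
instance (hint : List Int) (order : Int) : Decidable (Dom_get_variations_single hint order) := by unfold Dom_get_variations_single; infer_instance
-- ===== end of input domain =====

-- B slides a single row (prepend 0, drop the trailing element) instead of rebuilding every row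
-- from three concatenations; same results, no hint==order special case needed (objective: alternative).

-- ===== PORT A =====
def get_variations_single (hint : List Int) (order : Int) : Option (List (List Int)) :=
  match PySem.List.pyGet? hint 0 with
  | none => none  -- Python raises IndexError on empty hint; excluded by Pre_
  | some h =>
    if h > order then none
    else if h = order then some [List.replicate order.toNat 1]
    else some ((PySem.List.pyRange 0 (order - h + 1) 1).foldl
        (fun lst i => lst ++ [List.replicate i.toNat 0 ++ List.replicate h.toNat 1
                              ++ List.replicate (order - h - i).toNat 0]) [])

-- ===== PORT B =====
-- the slide loop: n remaining slides; each step the row gains a leading 0 and loses its last entry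
def gvsSlide : Nat → List Int → List (List Int)
  | 0, row => [row]
  | n+1, row => row :: gvsSlide n (0 :: row.dropLast)

def get_variations_single_alt (hint : List Int) (order : Int) : Option (List (List Int)) :=
  match PySem.List.pyGet? hint 0 with
  | none => none  -- B also raises IndexError on empty hint; excluded by Pre_
  | some h =>
    if h > order then none
    else some (gvsSlide (order - h).toNat
                 (List.replicate h.toNat 1 ++ List.replicate (order - h).toNat 0))

-- ===== PRECONDITION & SPEC =====
-- Pre_ excludes only the empty hint list, on which both Pythons raise IndexError.
def Pre_get_variations_single (hint : List Int) (order : Int) : Prop := hint ≠ []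
instance (hint : List Int) (order : Int) : Decidable (Pre_get_variations_single hint order) := by unfold Pre_get_variations_single; infer_instance
def pvWitness_get_variations_single : List Int × Int := ([2], 5)

def Spec_get_variations_single (hint : List Int) (order : Int) (out : Option (List (List Int))) : Prop := out = get_variations_single_alt hint order
instance (hint : List Int) (order : Int) (out : Option (List (List Int))) : Decidable (Spec_get_variations_single hint order out) := by unfold Spec_get_variations_single; infer_instance

-- ===== CLAIM (what is proved, stated in full; the proofs are below) =====
def Claim_equal_get_variations_single : Prop := ∀ (hint : List Int) (order : Int), Dom_get_variations_single hint order → Pre_get_variations_single hint order → Spec_get_variations_single hint order (get_variations_single hint order)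

-- ===== LEMMAS AND PROOFS =====

-- sliding a block row n times produces exactly the n+1 concatenation-built rows
lemma gvs_eq (n : Nat) : ∀ (ones : List Int),
    gvsSlide n (ones ++ List.replicate n 0)
      = (List.range (n+1)).map (fun i => List.replicate i (0:Int) ++ ones ++ List.replicate (n-i) 0) := by
  induction n with
  | zero => intro ones; simp [gvsSlide]
  | succ n ih =>
    intro ones
    have hdrop : (ones ++ List.replicate (n+1) (0:Int)).dropLast = ones ++ List.replicate n 0 := by
      rw [List.replicate_succ', ← List.append_assoc, List.dropLast_concat]
    have hstep : gvsSlide (n+1) (ones ++ List.replicate (n+1) (0:Int))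
        = (ones ++ List.replicate (n+1) 0) :: gvsSlide n ((0 :: ones) ++ List.replicate n 0) := by
      simp [gvsSlide, hdrop]
    rw [hstep, ih (0 :: ones)]
    conv_rhs => rw [List.range_succ_eq_map, List.map_cons, List.map_map]
    have hf : ((fun i => List.replicate i (0:Int) ++ ones ++ List.replicate (n+1-i) 0) ∘ Nat.succ)
        = fun i => List.replicate i (0:Int) ++ (0 :: ones) ++ List.replicate (n-i) 0 := by
      funext i
      simp only [Function.comp_apply, Nat.succ_sub_succ]
      simp [List.replicate_succ']
    simp only [hf]
    simp

-- main case h < order: A's range-loop equals B's slide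
lemma gvs_main (h order : Int) (hlt : h < order) :
    ((PySem.List.pyRange 0 (order - h + 1) 1).foldl
        (fun lst i => lst ++ [List.replicate i.toNat 0 ++ List.replicate h.toNat 1
                              ++ List.replicate (order - h - i).toNat 0]) [])
      = gvsSlide (order - h).toNat
          (List.replicate h.toNat 1 ++ List.replicate (order - h).toNat 0) := by
  set m : Int := order - h with hm
  have hm1 : 0 < m := by omega
  rw [PySem.List.foldl_append_singleton_eq_map, List.nil_append]
  rw [PySem.List.pyRange_one, List.map_map]
  have hto : (m + 1 - 0).toNat = m.toNat + 1 := by omega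
  rw [hto, gvs_eq m.toNat (List.replicate h.toNat 1)]
  apply List.map_congr_left
  intro k hk
  have hk' : k < m.toNat + 1 := List.mem_range.mp hk
  have h1 : ((0:Int) + (k:Int)).toNat = k := by omega
  have h2 : (m - ((0:Int) + (k:Int))).toNat = m.toNat - k := by omega
  simp only [Function.comp, h1, h2]

lemma equiv_all (hint : List Int) (order : Int) :
    get_variations_single hint order = get_variations_single_alt hint order := by
  cases hget : PySem.List.pyGet? hint 0 with
  | none => simp [get_variations_single, get_variations_single_alt, hget]
  | some h =>
    by_cases hgt : h > order
    · simp [get_variations_single, get_variations_single_alt, hget, hgt]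
    · by_cases heq : h = order
      · have h0 : (order - h).toNat = 0 := by omega
        simp [get_variations_single, get_variations_single_alt, hget, heq, gvsSlide]
      · have hlt : h < order := by omega
        simp only [get_variations_single, get_variations_single_alt, hget, if_neg hgt, if_neg heq]
        rw [gvs_main h order hlt]

-- ===== VERDICT (by name: the statement is the Claim_ definition above) =====
theorem get_variations_single_spec : Claim_equal_get_variations_single := by
  intro hint order _ _
  unfold Spec_get_variations_single
  exact equiv_all hint order
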